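-- pv_equiv track=rewrite | github.com/Youssef8400/OCR3 | main.py | find_closest_sex
-- ===== SOURCE A (Python) =====
-- def find_closest_sex(line, index):
--     i, j = index, index
--     while True:
--         if i >= len(line) and j < 0:
--             return -1
--         if i < len(line) and line[i] in 'FM':
--             return i
--         if j >= 0 and line[j] in 'FM':
--             return j
--         i += 1
--         j -= 1
-- ===== SOURCE B (Python) =====
-- def find_closest_sex(line, index):
--     n = len(line)
--     fwd = None
--     for i in range(index, n):
--         if line[i] in 'FM':
--             fwd = i
--             break
--     bwd = None
--     j = index
--     while j >= 0:
--         if line[j] in 'FM':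
--             bwd = j
--             break
--         j -= 1
--     if fwd is not None and (bwd is None or fwd - index <= index - bwd):
--         return fwd
--     if bwd is not None:
--         return bwd
--     return -1
-- ===== Notes on version B (the rewrite author's own statement) =====
-- stated objective: alternative
-- what changed: Replaces A's single interleaved two-pointer loop by two independent passes (first forward match, first backward match) combined by an explicit distance comparison with forward winning ties.
import Mathlib
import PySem

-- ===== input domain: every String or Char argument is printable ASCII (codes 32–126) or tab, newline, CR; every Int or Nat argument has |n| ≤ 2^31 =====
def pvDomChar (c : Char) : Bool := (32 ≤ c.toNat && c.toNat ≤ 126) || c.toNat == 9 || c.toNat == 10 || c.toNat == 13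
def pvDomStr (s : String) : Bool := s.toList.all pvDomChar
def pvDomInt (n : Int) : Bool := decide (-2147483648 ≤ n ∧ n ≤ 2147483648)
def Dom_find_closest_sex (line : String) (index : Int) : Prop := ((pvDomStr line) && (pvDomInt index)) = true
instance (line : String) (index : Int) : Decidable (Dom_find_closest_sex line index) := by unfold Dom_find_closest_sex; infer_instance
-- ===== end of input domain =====

-- B replaces A's interleaved two-pointer loop by two independent passes (first match forward,
-- first match backward) combined by a distance comparison (forward wins ties): objective 'alternative'.

-- ===== PORT A =====
-- `line[k] in 'FM'`; none (IndexError in Python) is treated as false, which the loop only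
-- reaches outside Pre_find_closest_sex.
def pvInFM (o : Option Char) : Bool :=
  match o with
  | some c => c == 'F' || c == 'M'
  | none => false

-- A's `while True` loop; the Nat argument is its termination measure
-- ((len-i)⁺ + (j+1)⁺, strictly decreasing, 0 only at the `return -1` exit),
-- used as structural fuel so the function reduces by `decide`; it never runs out.
def pvLoopA (cs : List Char) : Nat → Int → Int → Int
  | 0, _, _ => -1
  | fuel+1, i, j =>
    if i ≥ (cs.length : Int) ∧ j < 0 then -1
    else if i < (cs.length : Int) ∧ pvInFM (PySem.List.pyGet? cs i) = true then i
    else if 0 ≤ j ∧ pvInFM (PySem.List.pyGet? cs j) = true then j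
    else pvLoopA cs fuel (i + 1) (j - 1)

def find_closest_sex (line : String) (index : Int) : Int :=
  pvLoopA line.toList
    (((line.toList.length : Int) - index).toNat + (index + 1).toNat) index index

-- ===== PORT B =====
-- backward pass: `j = index; while j >= 0: … j -= 1`; the Nat argument is the
-- loop's termination measure (j+1)⁺ used as structural fuel; it never runs out.
def pvFindBwd (cs : List Char) : Nat → Int → Option Int
  | 0, _ => none
  | fuel+1, j =>
    if 0 ≤ j then
      if pvInFM (PySem.List.pyGet? cs j) = true then some j else pvFindBwd cs fuel (j - 1)
    else none

def find_closest_sex_alt (line : String) (index : Int) : Int :=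
  let cs := line.toList
  -- forward pass: `for i in range(index, n): …` with break at the first match
  let fwd := (PySem.List.pyRange index (cs.length : Int) 1).find?
      (fun k => pvInFM (PySem.List.pyGet? cs k))
  let bwd := pvFindBwd cs (index + 1).toNat index
  match fwd, bwd with
  | some f, some b => if f - index ≤ index - b then f else b
  | some f, none => f
  | none, some b => b
  | none, none => -1

-- ===== PRECONDITION & SPEC =====
-- Pre_ excludes exactly the inputs where A raises IndexError: index ≥ len(line), or
-- index < -len(line) (negative wraparound out of range). A returns on every other input.
def Pre_find_closest_sex (line : String) (index : Int) : Prop :=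
  -(line.toList.length : Int) ≤ index ∧ index < (line.toList.length : Int)
instance (line : String) (index : Int) : Decidable (Pre_find_closest_sex line index) := by
  unfold Pre_find_closest_sex; infer_instance

def pvWitness_find_closest_sex : String × Int := ("xF", 0)

def Spec_find_closest_sex (line : String) (index : Int) (out : Int) : Prop := out = find_closest_sex_alt line index
instance (line : String) (index : Int) (out : Int) : Decidable (Spec_find_closest_sex line index out) := by unfold Spec_find_closest_sex; infer_instance

-- ===== CLAIM (what is proved, stated in full; the proofs are below) =====
def Claim_equal_find_closest_sex : Prop := ∀ (line : String) (index : Int), Dom_find_closest_sex line index → Pre_find_closest_sex line index → Spec_find_closest_sex line index (find_closest_sex line index)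

-- ===== LEMMAS AND PROOFS =====

theorem pvFindBwd_le (cs : List Char) (fuel : Nat) (j b : Int)
    (h : pvFindBwd cs fuel j = some b) : b ≤ j := by
  induction fuel generalizing j with
  | zero => simp [pvFindBwd] at h
  | succ fuel ih =>
    simp only [pvFindBwd] at h
    split_ifs at h with hj hfm
    · exact le_of_eq (Option.some.inj h).symm
    · have := ih (j - 1) h; omega

theorem find?_pyRange_ge (cs : List Char) (a b f : Int)
    (h : (PySem.List.pyRange a b 1).find? (fun k => pvInFM (PySem.List.pyGet? cs k)) = some f) :
    a ≤ f := by
  have hmem := List.mem_of_find?_eq_some h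
  exact (PySem.List.mem_pyRange_one.mp hmem).1

theorem loop_eq (cs : List Char) (fuel : Nat) (i j : Int)
    (hfuel : ((cs.length : Int) - i).toNat + (j + 1).toNat ≤ fuel) :
    pvLoopA cs fuel i j =
      match (PySem.List.pyRange i (cs.length : Int) 1).find?
          (fun k => pvInFM (PySem.List.pyGet? cs k)), pvFindBwd cs (j + 1).toNat j with
      | some f, some b => if f - i ≤ j - b then f else b
      | some f, none => f
      | none, some b => b
      | none, none => -1 := by
  induction fuel generalizing i j with
  | zero =>
    rw [PySem.List.pyRange_one_eq_nil (by omega)]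
    rw [show (j + 1).toNat = 0 by omega]
    rfl
  | succ fuel ih =>
    rw [pvLoopA]
    by_cases h1 : i ≥ (cs.length : Int) ∧ j < 0
    · rw [if_pos h1, PySem.List.pyRange_one_eq_nil (by omega),
          show (j + 1).toNat = 0 by omega]
      rfl
    rw [if_neg h1]
    by_cases h2 : i < (cs.length : Int) ∧ pvInFM (PySem.List.pyGet? cs i) = true
    · rw [if_pos h2, PySem.List.pyRange_one_cons h2.1,
          List.find?_cons_of_pos (by simpa using h2.2)]
      cases hb : pvFindBwd cs (j + 1).toNat j with
      | none => rfl
      | some b =>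
        have := pvFindBwd_le cs _ j b hb
        exact (if_pos (by omega : i - i ≤ j - b)).symm
    rw [if_neg h2]
    by_cases h3 : 0 ≤ j ∧ pvInFM (PySem.List.pyGet? cs j) = true
    · rw [if_pos h3]
      rw [show (j + 1).toNat = j.toNat + 1 by omega, pvFindBwd, if_pos h3.1, if_pos h3.2]
      by_cases hi : i < (cs.length : Int)
      · have hfm : ¬ (pvInFM (PySem.List.pyGet? cs i) = true) := fun hc => h2 ⟨hi, hc⟩
        rw [PySem.List.pyRange_one_cons hi,
            List.find?_cons_of_neg (by simpa using hfm)]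
        cases hf : (PySem.List.pyRange (i+1) (cs.length : Int) 1).find?
            (fun k => pvInFM (PySem.List.pyGet? cs k)) with
        | none => rfl
        | some f =>
          have := find?_pyRange_ge cs (i+1) _ f hf
          exact (if_neg (by omega : ¬ (f - i ≤ j - j))).symm
      · rw [PySem.List.pyRange_one_eq_nil (by omega)]
        rfl
    rw [if_neg h3]
    rw [ih (i + 1) (j - 1) (by omega)]
    have hfwd : (PySem.List.pyRange i (cs.length : Int) 1).find?
          (fun k => pvInFM (PySem.List.pyGet? cs k))
        = (PySem.List.pyRange (i+1) (cs.length : Int) 1).find?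
          (fun k => pvInFM (PySem.List.pyGet? cs k)) := by
      by_cases hi : i < (cs.length : Int)
      · have hfm : ¬ (pvInFM (PySem.List.pyGet? cs i) = true) := fun hc => h2 ⟨hi, hc⟩
        rw [PySem.List.pyRange_one_cons hi, List.find?_cons_of_neg (by simpa using hfm)]
      · rw [PySem.List.pyRange_one_eq_nil (by omega),
            PySem.List.pyRange_one_eq_nil (by omega)]
    have hbwd : pvFindBwd cs (j + 1).toNat j = pvFindBwd cs (j - 1 + 1).toNat (j - 1) := by
      by_cases hj : 0 ≤ j
      · have hfm : ¬ (pvInFM (PySem.List.pyGet? cs j) = true) := fun hc => h3 ⟨hj, hc⟩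
        rw [show (j + 1).toNat = j.toNat + 1 by omega, pvFindBwd, if_pos hj, if_neg hfm]
        rw [show (j - 1 + 1).toNat = j.toNat by omega]
      · rw [show (j + 1).toNat = 0 by omega, show (j - 1 + 1).toNat = 0 by omega]
        rfl
    rw [hfwd, hbwd]
    cases (PySem.List.pyRange (i+1) (cs.length : Int) 1).find?
        (fun k => pvInFM (PySem.List.pyGet? cs k)) with
    | none => cases pvFindBwd cs (j - 1 + 1).toNat (j - 1) <;> rfl
    | some f =>
      cases pvFindBwd cs (j - 1 + 1).toNat (j - 1) with
      | none => rfl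
      | some b =>
        simp only []
        congr 1
        · exact propext ⟨fun h => by omega, fun h => by omega⟩

-- ===== VERDICT (by name: the statement is the Claim_ definition above) =====
theorem find_closest_sex_spec : Claim_equal_find_closest_sex := by
  intro line index _ _
  unfold Spec_find_closest_sex find_closest_sex find_closest_sex_alt
  exact loop_eq line.toList _ index index (by omega)
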